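-- pv_equiv track=rewrite | github.com/Audrey-cn/PTG-agent | prometheus/tools/security/fuzzy_match.py | _find_normalized_matches
-- ===== SOURCE A (Python) =====
-- def _calculate_line_positions(
--     content_lines: list[str], start_line: int, end_line: int, content_length: int
-- ) -> tuple[int, int]:
--     """Calculate start and end character positions from line indices."""
--
--     start_pos = sum(len(line) + 1 for line in content_lines[:start_line])
--     end_pos = sum(len(line) + 1 for line in content_lines[:end_line]) - 1
--     if end_pos >= content_length:
--         end_pos = content_length
--     return start_pos, end_pos
--
-- def _find_normalized_matches(
--     content: str,
--     content_lines: list[str],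
--     content_normalized_lines: list[str],
--     pattern: str,
--     pattern_normalized: str,
-- ) -> list[tuple[int, int]]:
--     """Find matches in normalized content and map back to original positions."""
--
--     pattern_norm_lines = pattern_normalized.split("\n")
--     num_pattern_lines = len(pattern_norm_lines)
--
--     matches = []
--
--     for i in range(len(content_normalized_lines) - num_pattern_lines + 1):
--         block = "\n".join(content_normalized_lines[i : i + num_pattern_lines])
--
--         if block == pattern_normalized:
--             start_pos, end_pos = _calculate_line_positions(
--                 content_lines, i, i + num_pattern_lines, len(content)
--             )
--             matches.append((start_pos, end_pos))
--
--     return matches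
-- ===== SOURCE B (Python) =====
-- def _find_normalized_matches(
--     content,
--     content_lines,
--     content_normalized_lines,
--     pattern,
--     pattern_normalized,
-- ):
--     """Find matches by comparing line slices directly, with prefix-summed offsets."""
--     plines = pattern_normalized.split("\n")
--     k = len(plines)
--     n = len(content_normalized_lines)
--     m = len(content_lines)
--     # prefix[j] = number of characters before line j (each line counted with its newline)
--     prefix = [0]
--     acc = 0
--     for line in content_lines:
--         acc += len(line) + 1
--         prefix.append(acc)
--     L = len(content)
--     first = plines[0]
--     out = []
--     for i in range(n - k + 1):
--         if content_normalized_lines[i] == first and content_normalized_lines[i:i + k] == plines: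
--             out.append((prefix[min(i, m)], min(prefix[min(i + k, m)] - 1, L)))
--     return out
-- ===== Notes on version B (the rewrite author's own statement) =====
-- stated objective: alternative
-- what changed: B precomputes a single prefix-sum array of line offsets instead of re-summing line lengths for every match, and tests each candidate window by a first-line check plus direct list-slice comparison instead of building a joined '\n' string per window.
import Mathlib
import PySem

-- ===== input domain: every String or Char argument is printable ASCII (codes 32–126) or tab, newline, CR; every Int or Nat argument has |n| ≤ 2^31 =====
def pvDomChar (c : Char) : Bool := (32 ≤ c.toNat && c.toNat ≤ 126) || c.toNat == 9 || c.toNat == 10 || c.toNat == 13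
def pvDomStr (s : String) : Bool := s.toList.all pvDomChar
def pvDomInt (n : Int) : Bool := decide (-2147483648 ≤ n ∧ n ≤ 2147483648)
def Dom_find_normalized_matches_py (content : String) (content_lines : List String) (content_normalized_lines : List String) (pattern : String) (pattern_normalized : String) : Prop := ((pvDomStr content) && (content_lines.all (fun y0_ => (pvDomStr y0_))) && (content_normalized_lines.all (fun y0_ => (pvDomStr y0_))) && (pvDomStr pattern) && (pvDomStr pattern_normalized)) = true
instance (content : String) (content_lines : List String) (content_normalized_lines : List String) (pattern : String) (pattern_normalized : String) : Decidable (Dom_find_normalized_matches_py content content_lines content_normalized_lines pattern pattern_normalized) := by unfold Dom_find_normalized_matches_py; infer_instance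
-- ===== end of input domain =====

-- B replaces A's per-candidate "\n".join + per-match slice-summing with one prefix-sum
-- pass over content_lines and a direct line-slice comparison (after a first-line check);
-- an alternative of similar cost; the return value is proved identical on the whole domain.


-- ===== PORT A =====
-- port of _calculate_line_positions
def calc_line_positions_py (content_lines : List String) (start_line : Int) (end_line : Int) (content_length : Int) : Int × Int :=
  let start_pos := ((PySem.List.slice content_lines none (some start_line)).map (fun line => PySem.Str.len line + 1)).sum
  let end_pos0 := ((PySem.List.slice content_lines none (some end_line)).map (fun line => PySem.Str.len line + 1)).sum - 1
  let end_pos := if end_pos0 ≥ content_length then content_length else end_pos0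
  (start_pos, end_pos)

def find_normalized_matches_py (content : String) (content_lines : List String) (content_normalized_lines : List String) (pattern : String) (pattern_normalized : String) : List (Int × Int) :=
  let pattern_norm_lines := (PySem.Str.split? pattern_normalized "\n").getD []   -- sep "\n" ≠ "": never none
  let num_pattern_lines : Int := pattern_norm_lines.length
  (PySem.List.pyRange 0 ((content_normalized_lines.length : Int) - num_pattern_lines + 1) 1).foldl
    (fun macc i =>
      let block := PySem.Str.join "\n" (PySem.List.slice content_normalized_lines (some i) (some (i + num_pattern_lines)))
      if block = pattern_normalized then
        macc ++ [calc_line_positions_py content_lines i (i + num_pattern_lines) (PySem.Str.len content)]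
      else macc) []

-- ===== PORT B =====
def find_normalized_matches_py_alt (content : String) (content_lines : List String) (content_normalized_lines : List String) (pattern : String) (pattern_normalized : String) : List (Int × Int) :=
  let plines := (PySem.Str.split? pattern_normalized "\n").getD []   -- sep "\n" ≠ "": never none
  let k : Int := plines.length
  let n : Int := content_normalized_lines.length
  let m : Int := content_lines.length
  let pa := content_lines.foldl (fun st line =>
      let acc' := st.2 + (PySem.Str.len line + 1)
      (st.1 ++ [acc'], acc')) ([(0 : Int)], (0 : Int))
  let pre := pa.1
  let L := PySem.Str.len content
  let first := PySem.List.pyGetD plines 0 ""   -- plines is never empty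
  (PySem.List.pyRange 0 (n - k + 1) 1).foldl
    (fun out i =>
      if PySem.List.pyGetD content_normalized_lines i "" = first ∧
         PySem.List.slice content_normalized_lines (some i) (some (i + k)) = plines then
        out ++ [(PySem.List.pyGetD pre (min i m) 0,
                 min (PySem.List.pyGetD pre (min (i + k) m) 0 - 1) L)]
      else out) []

-- ===== PRECONDITION & SPEC =====
def Spec_find_normalized_matches_py (content : String) (content_lines : List String) (content_normalized_lines : List String) (pattern : String) (pattern_normalized : String) (out : List (Int × Int)) : Prop := out = find_normalized_matches_py_alt content content_lines content_normalized_lines pattern pattern_normalized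
instance (content : String) (content_lines : List String) (content_normalized_lines : List String) (pattern : String) (pattern_normalized : String) (out : List (Int × Int)) : Decidable (Spec_find_normalized_matches_py content content_lines content_normalized_lines pattern pattern_normalized out) := by unfold Spec_find_normalized_matches_py; infer_instance

-- ===== CLAIM (what is proved, stated in full; the proofs are below) =====
def Claim_equal_find_normalized_matches_py : Prop := ∀ (content : String) (content_lines : List String) (content_normalized_lines : List String) (pattern : String) (pattern_normalized : String), Dom_find_normalized_matches_py content content_lines content_normalized_lines pattern pattern_normalized → Spec_find_normalized_matches_py content content_lines content_normalized_lines pattern pattern_normalized (find_normalized_matches_py content content_lines content_normalized_lines pattern pattern_normalized)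

-- ===== LEMMAS AND PROOFS =====

-- A clean structural model of Python's str.split("\n") on char lists.
def mySplit : List Char → List (List Char)
  | [] => [[]]
  | c :: r =>
    match mySplit r with
    | [] => [[]]
    | h :: t => if c = '\n' then [] :: h :: t else (c :: h) :: t

theorem mySplit_ne_nil (x : List Char) : mySplit x ≠ [] := by
  cases x with
  | nil => simp [mySplit]
  | cons c r =>
    simp only [mySplit]
    cases mySplit r with
    | nil => simp
    | cons h t => by_cases hc : c = '\n' <;> simp [hc]

def consHead (p : List Char) : List (List Char) → List (List Char)
  | [] => []
  | h :: t => (p ++ h) :: t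

theorem go_eq (fuel : Nat) : ∀ (l cur : List Char) (acc : List (List Char)), l.length < fuel →
    PySem.Chars.splitOn.go ['\n'] fuel l cur acc = acc.reverse ++ consHead cur.reverse (mySplit l) := by
  induction fuel with
  | zero => intro l cur acc h; omega
  | succ f ih =>
    intro l cur acc h
    cases l with
    | nil =>
      rw [PySem.Chars.splitOn.go.eq_def]
      simp [mySplit, consHead]
    | cons c rest =>
      rw [PySem.Chars.splitOn.go.eq_def]
      simp only [List.isPrefixOf, Bool.and_true]
      obtain ⟨hh, tt, hmt⟩ := List.exists_cons_of_ne_nil (mySplit_ne_nil rest)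
      by_cases hc : c = '\n'
      · subst hc
        rw [if_pos (by simp)]
        have hd : List.drop (['\n'] : List Char).length ('\n' :: rest) = rest := rfl
        rw [hd, ih rest [] (cur.reverse :: acc) (by simpa using Nat.lt_of_succ_lt_succ h)]
        simp [mySplit, hmt, consHead]
      · have hbc : ('\n' == c) = false := by
          simp [beq_eq_false_iff_ne]; exact fun hx => hc hx.symm
        simp only [hbc, Bool.false_eq_true, if_false]
        rw [ih rest (c :: cur) acc (by simpa using Nat.lt_of_succ_lt_succ h)]
        simp [mySplit, hmt, consHead, hc, List.append_assoc]

theorem splitOn_eq (s : List Char) : PySem.Chars.splitOn s ['\n'] = mySplit s := by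
  unfold PySem.Chars.splitOn
  rw [go_eq (s.length + 1) s [] [] (by omega)]
  obtain ⟨hh, tt, hmt⟩ := List.exists_cons_of_ne_nil (mySplit_ne_nil s)
  simp [hmt, consHead]

theorem join_mySplit (x : List Char) : PySem.Chars.join ['\n'] (mySplit x) = x := by
  induction x with
  | nil => simp [mySplit, PySem.Chars.join_singleton]
  | cons c r ih =>
    obtain ⟨hh, tt, hmt⟩ := List.exists_cons_of_ne_nil (mySplit_ne_nil r)
    simp only [mySplit, hmt]
    by_cases hc : c = '\n'
    · subst hc
      rw [if_pos rfl, PySem.Chars.join_cons_cons]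
      rw [hmt] at ih
      simp [ih]
    · simp only [if_neg hc]
      cases tt with
      | nil =>
        rw [PySem.Chars.join_singleton]
        rw [hmt, PySem.Chars.join_singleton] at ih
        simp [ih]
      | cons t2 ts =>
        rw [PySem.Chars.join_cons_cons]
        rw [hmt, PySem.Chars.join_cons_cons] at ih
        simp only [List.cons_append] at ih ⊢
        rw [List.append_assoc] at ih ⊢
        simpa using ih

theorem mySplit_append (a b : List Char) : mySplit (a ++ '\n' :: b) = mySplit a ++ mySplit b := by
  induction a with
  | nil =>
    obtain ⟨hh, tt, hmt⟩ := List.exists_cons_of_ne_nil (mySplit_ne_nil b)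
    simp [mySplit, hmt]
  | cons c a' ih =>
    simp only [List.cons_append, mySplit, ih]
    obtain ⟨hh, tt, hmt⟩ := List.exists_cons_of_ne_nil (mySplit_ne_nil a')
    by_cases hc : c = '\n' <;> simp [hmt, hc]

theorem mySplit_join (xs : List (List Char)) (hne : xs ≠ []) :
    mySplit (PySem.Chars.join ['\n'] xs) = xs.flatMap mySplit := by
  induction xs with
  | nil => exact absurd rfl hne
  | cons x rest ih =>
    cases rest with
    | nil => simp [PySem.Chars.join_singleton]
    | cons y ys =>
      rw [PySem.Chars.join_cons_cons]
      have : x ++ ['\n'] ++ PySem.Chars.join ['\n'] (y :: ys) = x ++ '\n' :: PySem.Chars.join ['\n'] (y :: ys) := by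
        simp
      rw [this, mySplit_append, ih (by simp)]
      simp

theorem flatMap_len_ge (xs : List (List Char)) : xs.length ≤ (xs.flatMap mySplit).length := by
  induction xs with
  | nil => simp
  | cons x rest ih =>
    have hx : 1 ≤ (mySplit x).length := by
      have := mySplit_ne_nil x
      cases hmx : mySplit x with
      | nil => exact absurd hmx this
      | cons _ _ => simp
    simp only [List.flatMap_cons, List.length_append, List.length_cons]
    omega

theorem mySplit_singleton_of_len (x : List Char) (h : (mySplit x).length = 1) : mySplit x = [x] := by
  cases hmx : mySplit x with
  | nil => exact absurd hmx (mySplit_ne_nil x)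
  | cons y ys =>
    rw [hmx] at h
    simp at h
    subst h
    have := join_mySplit x
    rw [hmx, PySem.Chars.join_singleton] at this
    rw [this]

theorem flatMap_eq_self (xs : List (List Char)) (h : (xs.flatMap mySplit).length = xs.length) :
    xs.flatMap mySplit = xs := by
  induction xs with
  | nil => simp
  | cons x rest ih =>
    have hx : 1 ≤ (mySplit x).length := by
      have := mySplit_ne_nil x
      cases hmx : mySplit x with
      | nil => exact absurd hmx this
      | cons _ _ => simp
    have hrest := flatMap_len_ge rest
    simp only [List.flatMap_cons, List.length_append, List.length_cons] at h
    have hx1 : (mySplit x).length = 1 := by omega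
    simp only [List.flatMap_cons, mySplit_singleton_of_len x hx1, List.singleton_append,
      List.cons.injEq, true_and]
    exact ih (by omega)

-- the key characterisation: joining k lines gives p exactly when the lines are p.split("\n")
theorem join_eq_iff (xs : List (List Char)) (p : List Char)
    (hlen : xs.length = (mySplit p).length) :
    PySem.Chars.join ['\n'] xs = p ↔ xs = mySplit p := by
  constructor
  · intro hj
    have hxne : xs ≠ [] := by
      intro hx
      rw [hx] at hlen
      exact (mySplit_ne_nil p) (List.length_eq_zero_iff.mp hlen.symm)
    have h1 : mySplit p = xs.flatMap mySplit := by
      rw [← hj, mySplit_join xs hxne]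
    have h2 : (xs.flatMap mySplit).length = xs.length := by
      rw [← h1, ← hlen]
    rw [h1, flatMap_eq_self xs h2]
  · intro hx
    rw [hx, join_mySplit]

-- ---- prefix sums ----

def lineS (ls : List String) (j : Nat) : Int := ((ls.take j).map (fun l => PySem.Str.len l + 1)).sum

theorem lineS_zero (ls : List String) : lineS ls 0 = 0 := by simp [lineS]

theorem lineS_cons (l : String) (r : List String) (j : Nat) :
    lineS (l :: r) (j + 1) = (PySem.Str.len l + 1) + lineS r j := by
  simp [lineS]

theorem lineS_clamp (ls : List String) (j : Nat) : lineS ls j = lineS ls (min j ls.length) := by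
  unfold lineS
  rw [List.take_eq_take_min]

theorem prefix_fold (ls : List String) (st : List Int × Int) :
    ls.foldl (fun st line =>
      let acc' := st.2 + (PySem.Str.len line + 1)
      (st.1 ++ [acc'], acc')) st
    = (st.1 ++ (List.range ls.length).map (fun j => st.2 + lineS ls (j + 1)),
       st.2 + lineS ls ls.length) := by
  induction ls generalizing st with
  | nil => simp [lineS]
  | cons l r ih =>
    simp only [List.foldl_cons]
    rw [ih]
    refine Prod.ext ?_ ?_
    · simp only [List.length_cons, List.range_succ_eq_map, List.map_cons, List.map_map]
      simp [lineS_cons, lineS_zero, Function.comp, add_assoc]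
    · simp [lineS_cons, add_assoc]

theorem pre_eq (ls : List String) :
    (ls.foldl (fun st line =>
      let acc' := st.2 + (PySem.Str.len line + 1)
      (st.1 ++ [acc'], acc')) ([(0 : Int)], (0 : Int))).1
    = (List.range (ls.length + 1)).map (lineS ls) := by
  rw [prefix_fold]
  simp [List.range_succ_eq_map, List.map_map, Function.comp, lineS_zero]

theorem map_toList_inj (xs ys : List String) (h : xs.map String.toList = ys.map String.toList) :
    xs = ys := by
  have : Function.Injective String.toList := fun a b hab => String.toList_inj.mp hab
  exact List.map_injective_iff.mpr this h

-- the value appended per match agrees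
theorem pos_eq (content_lines : List String) (content : String) (i k : Int)
    (hi : 0 ≤ i) (hk : 0 ≤ k) :
    calc_line_positions_py content_lines i (i + k) (PySem.Str.len content)
    = ((PySem.List.pyGetD ((List.range (content_lines.length + 1)).map (lineS content_lines)) (min i (content_lines.length : Int)) 0),
       min (PySem.List.pyGetD ((List.range (content_lines.length + 1)).map (lineS content_lines)) (min (i + k) (content_lines.length : Int)) 0 - 1) (PySem.Str.len content)) := by
  have hm : (0 : Int) ≤ content_lines.length := by positivity
  have hgd : ∀ t : Int, 0 ≤ t →
      PySem.List.pyGetD ((List.range (content_lines.length + 1)).map (lineS content_lines)) (min t (content_lines.length : Int)) 0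
      = lineS content_lines t.toNat := by
    intro t ht
    rw [PySem.List.pyGetD_of_nonneg _ _ (le_min ht hm)]
    have h1 : (min t (content_lines.length : Int)).toNat = min t.toNat content_lines.length := by
      omega
    rw [h1, PySem.List.getD_map_range _ _ _ _ (by omega)]
    exact (lineS_clamp content_lines t.toNat).symm
  unfold calc_line_positions_py
  rw [hgd i hi, hgd (i + k) (by omega)]
  rw [PySem.List.slice_to content_lines hi, PySem.List.slice_to content_lines (by omega : (0:Int) ≤ i + k)]
  have : ∀ (e L : Int), (if e ≥ L then L else e) = min e L := by
    intro e L; split_ifs <;> omega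
  simp only [lineS, this]

-- ===== VERDICT (by name: the statement is the Claim_ definition above) =====
theorem split?_newline (s : String) :
    (PySem.Str.split? s "\n").getD [] = (mySplit s.toList).map String.ofList := by
  simp [PySem.Str.split?, PySem.Chars.split?, splitOn_eq]

theorem plines_toList (s : String) :
    ((PySem.Str.split? s "\n").getD []).map String.toList = mySplit s.toList := by
  rw [split?_newline]
  simp [List.map_map, Function.comp_def, String.toList_ofList]

theorem find_normalized_matches_py_spec : Claim_equal_find_normalized_matches_py := by
  intro content cl cnl pat pn _
  unfold Spec_find_normalized_matches_py find_normalized_matches_py find_normalized_matches_py_alt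
  simp only []
  apply PySem.List.foldl_congr_mem
  intro acc i hi
  rw [PySem.List.mem_pyRange_one] at hi
  obtain ⟨hi0, hiu⟩ := hi
  -- abbreviations
  set plines := (PySem.Str.split? pn "\n").getD [] with hpl
  set k : Int := (plines.length : Int) with hk
  have hplT : plines.map String.toList = mySplit pn.toList := plines_toList pn
  have hkpos : 1 ≤ plines.length := by
    have h1 := mySplit_ne_nil pn.toList
    have h2 : (mySplit pn.toList).length = plines.length := by
      rw [← hplT]; simp
    cases hmx : mySplit pn.toList with
    | nil => exact absurd hmx h1
    | cons _ _ => rw [hmx] at h2; simp at h2; omega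
  have hin : i + k ≤ (cnl.length : Int) := by omega
  -- the compared slice
  have hsl := PySem.List.slice_toNat cnl hi0 (by omega : (0:Int) ≤ i + k)
  have hslice_len : (PySem.List.slice cnl (some i) (some (i + k))).length = plines.length := by
    rw [hsl]
    simp only [List.length_take, List.length_drop]
    omega
  -- condition equivalence
  have hcond : (PySem.Str.join "\n" (PySem.List.slice cnl (some i) (some (i + k))) = pn)
      ↔ (PySem.List.pyGetD cnl i "" = PySem.List.pyGetD plines 0 "" ∧
         PySem.List.slice cnl (some i) (some (i + k)) = plines) := by
    have hjoin : (PySem.Str.join "\n" (PySem.List.slice cnl (some i) (some (i + k))) = pn)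
        ↔ PySem.List.slice cnl (some i) (some (i + k)) = plines := by
      rw [← String.toList_inj, PySem.Str.toList_join,
        show ("\n" : String).toList = ['\n'] from by decide]
      rw [join_eq_iff _ _ (by rw [← hplT]; simp [hslice_len])]
      rw [← hplT]
      constructor
      · exact map_toList_inj _ _
      · intro h; rw [h]
    rw [hjoin]
    constructor
    · intro hs
      refine ⟨?_, hs⟩
      -- first-line check is implied by the slice equality
      obtain ⟨f, rest, hfr⟩ := List.exists_cons_of_ne_nil
        (by intro h0; rw [h0] at hkpos; simp at hkpos : plines ≠ [])
      have hhead : (PySem.List.slice cnl (some i) (some (i + k))).head? = some f := by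
        rw [hs, hfr]; rfl
      rw [hsl, List.head?_take, if_neg (by omega), List.head?_drop] at hhead
      rw [PySem.List.pyGetD_of_nonneg cnl _ hi0, PySem.List.pyGetD_of_nonneg plines _ le_rfl,
        List.getD_eq_getElem?_getD, List.getD_eq_getElem?_getD, hhead, hfr]
      rfl
    · exact fun h => h.2
  -- now compare the two branch bodies
  rw [if_congr hcond rfl rfl]
  by_cases hc : (PySem.List.pyGetD cnl i "" = PySem.List.pyGetD plines 0 "" ∧
      PySem.List.slice cnl (some i) (some (i + k)) = plines)
  · rw [if_pos hc, if_pos hc]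
    rw [pos_eq cl content i k hi0 (by omega), pre_eq cl]
  · rw [if_neg hc, if_neg hc]
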